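-- pv_equiv track=rewrite | github.com/openmpy/solve | 프로그래머스/1/17681. ［1차］ 비밀지도/［1차］ 비밀지도.py | solution
-- ===== SOURCE A (Python) =====
-- def solution(n, arr1, arr2):
--     answer = []
--
--     for i in range(len(arr1)):
--         number = str(format((arr1[i] | arr2[i]), 'b'))
--
--         if len(number) < n:
--             number = '0' * (n - len(number)) + number
--
--         number = number.replace('1', '#')
--         number = number.replace('0', ' ')
--
--         answer.append(number)
--
--     return answer
-- ===== SOURCE B (Python) =====
-- _CELLS = str.maketrans('01', ' #')
--
--
-- def _bin(v):
--     if v < 0: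
--         return '-' + _bin(-v)
--     if v < 2:
--         return '01'[v]
--     return _bin(v >> 1) + '01'[v & 1]
--
--
-- def solution(n, arr1, arr2):
--     return [_bin(x | y).rjust(n, '0').translate(_CELLS) for x, y in zip(arr1, arr2)]
-- ===== Notes on version B (the rewrite author's own statement) =====
-- stated objective: alternative
-- what changed: Replaces A's index loop with format(v,'b') + manual zero-pad + two str.replace passes by a zip comprehension using a hand-written recursive binary renderer, str.rjust and a single translation table.
import Mathlib
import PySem

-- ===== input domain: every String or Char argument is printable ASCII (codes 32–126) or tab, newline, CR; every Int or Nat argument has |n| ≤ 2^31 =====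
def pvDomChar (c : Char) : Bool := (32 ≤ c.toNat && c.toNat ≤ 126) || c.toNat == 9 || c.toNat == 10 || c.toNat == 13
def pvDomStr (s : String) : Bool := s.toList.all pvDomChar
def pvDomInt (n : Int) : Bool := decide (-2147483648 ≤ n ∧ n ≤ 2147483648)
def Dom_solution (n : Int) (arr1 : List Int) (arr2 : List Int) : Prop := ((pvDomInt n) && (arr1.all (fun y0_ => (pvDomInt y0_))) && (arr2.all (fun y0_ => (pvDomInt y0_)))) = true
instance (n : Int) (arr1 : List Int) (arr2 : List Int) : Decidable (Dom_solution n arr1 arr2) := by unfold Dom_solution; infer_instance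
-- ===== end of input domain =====

-- B decodes each row with a hand-written recursive binary renderer, str.rjust and one
-- translation table in a zip comprehension, instead of A's index loop with format(v,'b'),
-- manual zero-pad and two str.replace passes (objective: alternative).

set_option maxRecDepth 8000


-- ===== PORT A =====
-- binDigits m acc: the binary digit characters of m (high-to-low) prepended to acc;
-- pyFormatB v = format(v, 'b') exactly (sign, then digits; format(0,'b') = "0").
def binDigits (m : Nat) (acc : List Char) : List Char :=
  if h : m = 0 then acc
  else binDigits (m / 2) ((if m % 2 = 1 then '1' else '0') :: acc)
termination_by m
decreasing_by exact Nat.div_lt_self (Nat.pos_of_ne_zero h) (by norm_num)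

def pyFormatB (v : Int) : List Char :=
  let ds := if v.natAbs = 0 then ['0'] else binDigits v.natAbs []
  if v < 0 then '-' :: ds else ds

def solution (n : Int) (arr1 : List Int) (arr2 : List Int) : List String :=
  (PySem.List.pyRange 0 arr1.length 1).foldl
    (fun answer i =>
      let number0 : List Char :=
        pyFormatB (Int.lor (PySem.List.pyGetD arr1 i 0) (PySem.List.pyGetD arr2 i 0))
      let number1 : List Char :=
        if (number0.length : Int) < n then
          List.replicate (n - (number0.length : Int)).toNat '0' ++ number0
        else number0
      let number2 := PySem.Chars.replace number1 ['1'] ['#']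
      let number3 := PySem.Chars.replace number2 ['0'] [' ']
      answer ++ [String.mk number3])
    []

-- ===== PORT B =====
-- binChars v = _bin(v) of Source B: hand-rolled sign-magnitude recursive binary renderer.
def binChars (v : Int) : List Char :=
  if v < 0 then '-' :: binChars (-v)
  else if v < 2 then [if v = 1 then '1' else '0']
  else binChars (v / 2) ++ [if v % 2 = 1 then '1' else '0']
termination_by (2 * v.natAbs + if v < 0 then 1 else 0)
decreasing_by all_goals (split_ifs <;> omega)

-- trCell = the translation table str.maketrans('01', ' #') applied to one character.
def trCell (c : Char) : Char := if c = '1' then '#' else if c = '0' then ' ' else c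

-- rowB n v = _bin(v).rjust(n, '0').translate(_CELLS)
def rowB (n : Int) (v : Int) : String :=
  let s := binChars v
  String.mk ((List.replicate (n - (s.length : Int)).toNat '0' ++ s).map trCell)

def solution_alt (n : Int) (arr1 : List Int) (arr2 : List Int) : List String :=
  (arr1.zip arr2).map (fun p => rowB n (Int.lor p.1 p.2))

-- ===== PRECONDITION & SPEC =====
-- Pre_ excludes exactly the inputs where A raises IndexError: arr2 shorter than arr1.
def Pre_solution (n : Int) (arr1 : List Int) (arr2 : List Int) : Prop :=
  arr1.length ≤ arr2.length
instance (n : Int) (arr1 : List Int) (arr2 : List Int) : Decidable (Pre_solution n arr1 arr2) := by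
  unfold Pre_solution; infer_instance

def pvWitness_solution : Int × List Int × List Int := (3, [5, 0], [2, 1])

def Spec_solution (n : Int) (arr1 : List Int) (arr2 : List Int) (out : List String) : Prop := out = solution_alt n arr1 arr2
instance (n : Int) (arr1 : List Int) (arr2 : List Int) (out : List String) : Decidable (Spec_solution n arr1 arr2 out) := by unfold Spec_solution; infer_instance

-- ===== CLAIM (what is proved, stated in full; the proofs are below) =====
def Claim_equal_solution : Prop := ∀ (n : Int) (arr1 : List Int) (arr2 : List Int), Dom_solution n arr1 arr2 → Pre_solution n arr1 arr2 → Spec_solution n arr1 arr2 (solution n arr1 arr2)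

-- ===== LEMMAS AND PROOFS =====

-- the combined effect of .replace('1','#').replace('0',' ') on one character
def gf (x : Char) : Char :=
  if (if x = '1' then '#' else x) = '0' then ' ' else (if x = '1' then '#' else x)

-- binary digits of m, high-to-low, as '0'/'1' characters
def binList (m : Nat) : List Char :=
  if h : m = 0 then [] else binList (m / 2) ++ [if m % 2 = 1 then '1' else '0']
termination_by m
decreasing_by exact Nat.div_lt_self (Nat.pos_of_ne_zero h) (by norm_num)

lemma replace_go_single (o c : Char) (l : List Char) : ∀ (fuel : Nat) (acc : List Char),
    l.length ≤ fuel →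
    PySem.Chars.replace.go [o] [c] fuel l acc
      = acc.reverse ++ l.map (fun x => if x = o then c else x) := by
  induction l with
  | nil =>
    intro fuel acc _
    cases fuel <;> simp [PySem.Chars.replace.go]
  | cons x t ih =>
    intro fuel acc hle
    cases fuel with
    | zero => simp at hle
    | succ f =>
      rw [PySem.Chars.replace.go]
      by_cases hx : x = o
      · subst hx
        have hp : ([x].isPrefixOf (x :: t)) = true := by simp [List.isPrefixOf]
        simp only [hp, if_true, List.length_nil, List.length_cons, Nat.zero_add,
          List.drop_succ_cons, List.drop_zero]
        rw [ih f _ (by simpa using hle)]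
        simp
      · have hp : ([o].isPrefixOf (x :: t)) = false := by
          simp only [List.isPrefixOf, List.isPrefixOf_nil_left, Bool.and_true]
          exact beq_eq_false_iff_ne.mpr (fun h => hx h.symm)
        simp only [hp, Bool.false_eq_true, if_false]
        rw [ih f _ (by simpa using Nat.le_of_succ_le_succ hle)]
        simp [hx]

lemma replace_single (o c : Char) (l : List Char) :
    PySem.Chars.replace l [o] [c] = l.map (fun x => if x = o then c else x) := by
  simp only [PySem.Chars.replace, List.isEmpty_cons, Bool.false_eq_true, if_false]
  simpa using replace_go_single o c l l.length [] le_rfl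

lemma binDigits_eq : ∀ m acc, binDigits m acc = binList m ++ acc := by
  intro m
  induction m using Nat.strong_induction_on with
  | _ m ih =>
    intro acc
    rw [binDigits, binList]
    by_cases h : m = 0
    · simp [h]
    · simp only [h, dif_neg, not_false_eq_true]
      rw [ih (m / 2) (Nat.div_lt_self (Nat.pos_of_ne_zero h) (by norm_num))]
      simp

lemma gf_eq_trCell : gf = trCell := by
  funext x
  unfold gf trCell
  by_cases h1 : x = '1'
  · simp [h1]
  · by_cases h0 : x = '0' <;> simp [h1, h0]

lemma binChars_nonneg_aux : ∀ (k : Nat) (v : Int), v.natAbs ≤ k → 0 ≤ v →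
    binChars v = if v.natAbs = 0 then ['0'] else binList v.natAbs := by
  intro k
  induction k with
  | zero =>
    intro v hk hv
    have h0 : v = 0 := by omega
    subst h0
    rw [binChars]
    norm_num
  | succ k ih =>
    intro v hk hv
    rw [binChars]
    rw [if_neg (by omega)]
    by_cases h2 : v < 2
    · rw [if_pos h2]
      interval_cases v
      · simp
      · simp [binList]
    · rw [if_neg h2]
      have hle : (v / 2).natAbs ≤ k := by omega
      have hnn : (0:Int) ≤ v / 2 := by omega
      rw [ih (v / 2) hle hnn]
      rw [if_neg (by omega)]
      rw [if_neg (show ¬ v.natAbs = 0 by omega)]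
      conv_rhs => rw [binList]
      rw [dif_neg (by omega)]
      have h1 : (v / 2).natAbs = v.natAbs / 2 := by omega
      have h3 : (v % 2 = 1) ↔ (v.natAbs % 2 = 1) := by omega
      rw [h1]
      congr 1
      simp only [h3]

lemma binChars_eq_pyFormatB (v : Int) : binChars v = pyFormatB v := by
  unfold pyFormatB
  by_cases hv : v < 0
  · rw [binChars, if_pos hv, if_pos hv]
    rw [binChars_nonneg_aux (-v).natAbs (-v) le_rfl (by omega)]
    have h0 : v.natAbs ≠ 0 := by omega
    have h1 : (-v).natAbs = v.natAbs := by omega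
    rw [h1, if_neg h0, if_neg h0, binDigits_eq]
    simp
  · rw [binChars_nonneg_aux v.natAbs v le_rfl (by omega), if_neg hv]
    by_cases h0 : v.natAbs = 0
    · simp [h0]
    · rw [if_neg h0, if_neg h0, binDigits_eq]
      simp

lemma row_eq (n v : Int) :
    (String.mk (PySem.Chars.replace (PySem.Chars.replace
      (if ((pyFormatB v).length : Int) < n then
          List.replicate (n - ((pyFormatB v).length : Int)).toNat '0' ++ pyFormatB v
        else pyFormatB v) ['1'] ['#']) ['0'] [' ']))
    = rowB n v := by
  rw [replace_single, replace_single]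
  unfold rowB
  simp only [List.map_map]
  have hmm : ((fun x => if x = '0' then ' ' else x) ∘ fun x => if x = '1' then '#' else x) = gf := by
    funext x; simp [gf, Function.comp]
  rw [hmm, gf_eq_trCell, binChars_eq_pyFormatB]
  apply congrArg String.mk
  by_cases hpad : ((pyFormatB v).length : Int) < n
  · rw [if_pos hpad]
  · rw [if_neg hpad]
    have h0 : (n - ((pyFormatB v).length : Int)).toNat = 0 := by omega
    rw [h0]
    simp

-- ===== VERDICT (by name: the statement is the Claim_ definition above) =====
theorem solution_spec : Claim_equal_solution := by
  intro n arr1 arr2 _ hpre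
  unfold Spec_solution solution solution_alt
  rw [PySem.List.foldl_append_singleton_eq_map, List.nil_append]
  rw [PySem.List.pyRange_zero_nat]
  apply List.ext_getElem
  · simpa using Nat.min_eq_left hpre
  · intro i h1 h2
    simp only [List.getElem_map, List.getElem_range, List.getElem_zip]
    have hi1 : i < arr1.length := by simpa using h1
    have hi2 : i < arr2.length := lt_of_lt_of_le hi1 hpre
    rw [PySem.List.pyGetD_natCast arr1 i 0, PySem.List.pyGetD_natCast arr2 i 0]
    simp only [List.getD_eq_getElem?_getD, List.getElem?_eq_getElem hi1,
      List.getElem?_eq_getElem hi2, Option.getD_some]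
    exact row_eq n _
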